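-- pv_equiv track=rewrite | github.com/HatsuSumi/Serendipity | project_stats.py | strip_js_css_comments
-- ===== SOURCE A (Python) =====
-- from typing import Dict, Iterable, List, Optional, Tuple, Callable
--
-- def strip_js_css_comments(text: str) -> str:
--     out: List[str] = []
--     i = 0
--     n = len(text)
--
--     in_squote = False
--     in_dquote = False
--     in_btick = False
--     in_block = False
--
--     while i < n:
--         ch = text[i]
--         nxt = text[i + 1] if i + 1 < n else ""
--
--         if in_block:
--             if ch == "*" and nxt == "/":
--                 in_block = False
--                 i += 2
--                 continue
--             # 保留换行，避免把两行拼一起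
--             if ch == "\n":
--                 out.append("\n")
--             i += 1
--             continue
--
--         # 字符串状态
--         if in_squote:
--             out.append(ch)
--             if ch == "\\" and i + 1 < n:
--                 out.append(text[i + 1])
--                 i += 2
--                 continue
--             if ch == "'":
--                 in_squote = False
--             i += 1
--             continue
--
--         if in_dquote:
--             out.append(ch)
--             if ch == "\\" and i + 1 < n:
--                 out.append(text[i + 1])
--                 i += 2
--                 continue
--             if ch == '"':
--                 in_dquote = False
--             i += 1
--             continue
--
--         if in_btick:
--             out.append(ch)
--             if ch == "\\" and i + 1 < n:
--                 out.append(text[i + 1])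
--                 i += 2
--                 continue
--             if ch == "`":
--                 in_btick = False
--             i += 1
--             continue
--
--         # 进入字符串
--         if ch == "'":
--             in_squote = True
--             out.append(ch)
--             i += 1
--             continue
--         if ch == '"':
--             in_dquote = True
--             out.append(ch)
--             i += 1
--             continue
--         if ch == "`":
--             in_btick = True
--             out.append(ch)
--             i += 1
--             continue
--
--         # 行注释
--         if ch == "/" and nxt == "/":
--             # 跳到行尾，但保留换行
--             i += 2
--             while i < n and text[i] != "\n":
--                 i += 1
--             continue
--
--         # 块注释
--         if ch == "/" and nxt == "*":
--             in_block = True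
--             i += 2
--             continue
--
--         out.append(ch)
--         i += 1
--
--     return "".join(out)
-- ===== SOURCE B (Python) =====
-- def _string_tail(text, i, q):
--     # copy a string body starting just after the opening quote q;
--     # returns (copied text, index after the closing quote / end)
--     n = len(text)
--     buf = []
--     while i < n:
--         c = text[i]
--         buf.append(c)
--         if c == "\\" and i + 1 < n:
--             buf.append(text[i + 1])
--             i += 2
--         elif c == q:
--             return "".join(buf), i + 1
--         else:
--             i += 1
--     return "".join(buf), i
--
--
-- def _skip_line(text, i):
--     # index of the next newline (kept) or end of text
--     n = len(text)
--     while i < n and text[i] != "\n":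
--         i += 1
--     return i
--
--
-- def _skip_block(text, i):
--     # consume a block comment body; returns (the newlines it contained, index after '*/' / end)
--     n = len(text)
--     buf = []
--     while i < n:
--         if text[i] == "*" and i + 1 < n and text[i + 1] == "/":
--             return "".join(buf), i + 2
--         if text[i] == "\n":
--             buf.append("\n")
--         i += 1
--     return "".join(buf), i
--
--
-- def strip_js_css_comments(text: str) -> str:
--     out = []
--     i = 0
--     n = len(text)
--     while i < n:
--         ch = text[i]
--         if ch in ("'", '"', "`"):
--             piece, i = _string_tail(text, i + 1, ch)
--             out.append(ch + piece)
--         elif ch == "/" and i + 1 < n and text[i + 1] == "/":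
--             i = _skip_line(text, i + 2)
--         elif ch == "/" and i + 1 < n and text[i + 1] == "*":
--             piece, i = _skip_block(text, i + 2)
--             out.append(piece)
--         else:
--             out.append(ch)
--             i += 1
--     return "".join(out)
-- ===== Notes on version B (the rewrite author's own statement) =====
-- stated objective: simpler
-- what changed: A's single scan driven by four persistent mode flags is replaced by a dispatch loop that, at each construct (string literal, line comment, block comment), calls a dedicated helper consuming the whole construct and returning the copied text and the resume index; no state flags survive across iterations.
import Mathlib
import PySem

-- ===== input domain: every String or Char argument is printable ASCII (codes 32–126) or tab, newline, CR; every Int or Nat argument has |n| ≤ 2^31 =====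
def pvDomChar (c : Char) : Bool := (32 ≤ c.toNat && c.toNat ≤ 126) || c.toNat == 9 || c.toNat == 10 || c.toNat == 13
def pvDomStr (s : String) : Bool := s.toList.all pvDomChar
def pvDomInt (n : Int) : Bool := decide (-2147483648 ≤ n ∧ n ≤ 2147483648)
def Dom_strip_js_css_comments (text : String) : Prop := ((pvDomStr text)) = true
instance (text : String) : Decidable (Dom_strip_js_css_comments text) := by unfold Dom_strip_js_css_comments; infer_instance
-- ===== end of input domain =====

-- B replaces A's single flag-driven scan by a dispatch loop with helper consumers
-- (string body / line comment / block comment), each returning its output and the rest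
-- of the input; objective: simpler (no persistent mode flags), same cost.

-- ===== PORT A =====
-- A's inner `while` that skips to the end of a line comment (leaving the newline).
def pvSkipLineA (cs : List Char) : List Char :=
  match cs with
  | [] => []
  | c :: rest => if c = '\n' then c :: rest else pvSkipLineA rest

theorem pvSkipLineA_length (cs : List Char) : (pvSkipLineA cs).length ≤ cs.length := by
  induction cs with
  | nil => simp [pvSkipLineA]
  | cons c rest ih =>
    simp only [pvSkipLineA]
    split
    · simp
    · exact Nat.le_trans ih (Nat.le_succ _)

-- A's main loop: one recursion over the remaining characters, carrying the four mode flags.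
def pvStripA (cs : List Char) (sq dq bt blk : Bool) : List Char :=
  match cs with
  | [] => []
  | ch :: rest =>
    if blk then
      if ch = '*' ∧ rest.head? = some '/' then pvStripA rest.tail sq dq bt false
      else (if ch = '\n' then ['\n'] else []) ++ pvStripA rest sq dq bt blk
    else if sq then
      if ch = '\\' then
        match rest with
        | d :: rest' => ch :: d :: pvStripA rest' sq dq bt blk
        | [] => ch :: pvStripA [] sq dq bt blk
      else if ch = '\'' then ch :: pvStripA rest false dq bt blk
      else ch :: pvStripA rest sq dq bt blk
    else if dq then
      if ch = '\\' then
        match rest with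
        | d :: rest' => ch :: d :: pvStripA rest' sq dq bt blk
        | [] => ch :: pvStripA [] sq dq bt blk
      else if ch = '"' then ch :: pvStripA rest sq false bt blk
      else ch :: pvStripA rest sq dq bt blk
    else if bt then
      if ch = '\\' then
        match rest with
        | d :: rest' => ch :: d :: pvStripA rest' sq dq bt blk
        | [] => ch :: pvStripA [] sq dq bt blk
      else if ch = '`' then ch :: pvStripA rest sq dq false blk
      else ch :: pvStripA rest sq dq bt blk
    else if ch = '\'' then ch :: pvStripA rest true dq bt blk
    else if ch = '"' then ch :: pvStripA rest sq true bt blk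
    else if ch = '`' then ch :: pvStripA rest sq dq true blk
    else if ch = '/' ∧ rest.head? = some '/' then pvStripA (pvSkipLineA rest.tail) sq dq bt blk
    else if ch = '/' ∧ rest.head? = some '*' then pvStripA rest.tail sq dq bt true
    else ch :: pvStripA rest sq dq bt blk
termination_by cs.length
decreasing_by
  all_goals simp_wf
  all_goals first
    | omega
    | (have h2 : rest.tail.length = rest.length - 1 := List.length_tail; omega)
    | (have h1 := pvSkipLineA_length rest.tail
       have h2 : rest.tail.length = rest.length - 1 := List.length_tail; omega)

def strip_js_css_comments (text : String) : String :=
  String.mk (pvStripA text.toList false false false false)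

-- ===== PORT B =====
-- _string_tail: copy a string body after the opening quote q; returns (copied, remaining).
def pvStringTail (q : Char) (cs : List Char) : List Char × List Char :=
  match cs with
  | [] => ([], [])
  | c :: rest =>
    if c = '\\' then
      match rest with
      | d :: rest' => let p := pvStringTail q rest'; (c :: d :: p.1, p.2)
      | [] => ([c], [])
    else if c = q then ([c], rest)
    else let p := pvStringTail q rest; (c :: p.1, p.2)

theorem pvStringTail_cons (q c : Char) (rest : List Char) :
  pvStringTail q (c :: rest) =
    if c = '\\' then
      match rest with
      | d :: rest' => (c :: d :: (pvStringTail q rest').1, (pvStringTail q rest').2)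
      | [] => ([c], [])
    else if c = q then ([c], rest)
    else (c :: (pvStringTail q rest).1, (pvStringTail q rest).2) := by
  rw [pvStringTail.eq_def]

-- _skip_line: drop up to (not including) the next newline.
def pvSkipLineB (cs : List Char) : List Char :=
  match cs with
  | [] => []
  | c :: rest => if c = '\n' then c :: rest else pvSkipLineB rest

-- _skip_block: consume a block comment body; returns (its newlines, remaining after '*/').
def pvSkipBlock (cs : List Char) : List Char × List Char :=
  match cs with
  | [] => ([], [])
  | c :: rest =>
    if c = '*' ∧ rest.head? = some '/' then ([], rest.tail)
    else let p := pvSkipBlock rest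
         ((if c = '\n' then ['\n'] else []) ++ p.1, p.2)

theorem pvStringTail_len_aux (q : Char) (n : Nat) :
    ∀ cs : List Char, cs.length ≤ n → (pvStringTail q cs).2.length ≤ cs.length := by
  induction n with
  | zero =>
    intro cs h
    cases cs with
    | nil => simp [pvStringTail]
    | cons c r => simp at h
  | succ n ih =>
    intro cs h
    cases cs with
    | nil => simp [pvStringTail]
    | cons c rest =>
      simp only [List.length_cons] at h
      rw [pvStringTail_cons]
      by_cases hb : c = '\\'
      · cases rest with
        | nil => simp [hb]
        | cons d rest' =>
          have := ih rest' (by simp at h ⊢; omega)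
          simp [hb]; omega
      · by_cases hq : c = q
        · subst hq; simp [hb]
        · have := ih rest (by omega)
          simp [hb, hq]; omega

theorem pvStringTail_length (q : Char) (cs : List Char) :
    (pvStringTail q cs).2.length ≤ cs.length :=
  pvStringTail_len_aux q cs.length cs (Nat.le_refl _)

theorem pvSkipLineB_length (cs : List Char) : (pvSkipLineB cs).length ≤ cs.length := by
  induction cs with
  | nil => simp [pvSkipLineB]
  | cons c rest ih =>
    simp only [pvSkipLineB]
    split
    · simp
    · exact Nat.le_trans ih (Nat.le_succ _)

theorem pvSkipBlock_length (cs : List Char) : (pvSkipBlock cs).2.length ≤ cs.length := by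
  induction cs with
  | nil => simp [pvSkipBlock]
  | cons c rest ih =>
    simp only [pvSkipBlock]
    split
    · have h2 : rest.tail.length = rest.length - 1 := List.length_tail
      simp; omega
    · simp at ih ⊢; omega

-- B's main loop: dispatch on the construct at the head and consume it wholly.
def pvStripB (cs : List Char) : List Char :=
  match cs with
  | [] => []
  | ch :: rest =>
    if ch = '\'' ∨ ch = '"' ∨ ch = '`' then
      let p := pvStringTail ch rest
      ch :: (p.1 ++ pvStripB p.2)
    else if ch = '/' ∧ rest.head? = some '/' then
      pvStripB (pvSkipLineB rest.tail)
    else if ch = '/' ∧ rest.head? = some '*' then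
      let p := pvSkipBlock rest.tail
      p.1 ++ pvStripB p.2
    else ch :: pvStripB rest
termination_by cs.length
decreasing_by
  all_goals simp_wf
  all_goals first
    | omega
    | (have h1 := pvStringTail_length ch rest; omega)
    | (have h1 := pvSkipLineB_length rest.tail
       have h2 : rest.tail.length = rest.length - 1 := List.length_tail; omega)
    | (have h1 := pvSkipBlock_length rest.tail
       have h2 : rest.tail.length = rest.length - 1 := List.length_tail; omega)

def strip_js_css_comments_alt (text : String) : String :=
  String.mk (pvStripB text.toList)

-- ===== PRECONDITION & SPEC =====
def Spec_strip_js_css_comments (text : String) (out : String) : Prop := out = strip_js_css_comments_alt text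
instance (text : String) (out : String) : Decidable (Spec_strip_js_css_comments text out) := by unfold Spec_strip_js_css_comments; infer_instance

-- ===== CLAIM (what is proved, stated in full; the proofs are below) =====
def Claim_equal_strip_js_css_comments : Prop := ∀ (text : String), Dom_strip_js_css_comments text → Spec_strip_js_css_comments text (strip_js_css_comments text)

-- ===== LEMMAS AND PROOFS =====

theorem pvSkipLineAB (cs : List Char) : pvSkipLineA cs = pvSkipLineB cs := by
  induction cs with
  | nil => rfl
  | cons c rest ih => simp only [pvSkipLineA, pvSkipLineB, ih]

-- The five mutually-recursive invariants: A in neutral mode computes B's main loop,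
-- and A in each string/block mode computes the corresponding B consumer followed by B.
def pvInv (cs : List Char) : Prop :=
  pvStripA cs false false false false = pvStripB cs
  ∧ pvStripA cs true false false false =
      (pvStringTail '\'' cs).1 ++ pvStripB (pvStringTail '\'' cs).2
  ∧ pvStripA cs false true false false =
      (pvStringTail '"' cs).1 ++ pvStripB (pvStringTail '"' cs).2
  ∧ pvStripA cs false false true false =
      (pvStringTail '`' cs).1 ++ pvStripB (pvStringTail '`' cs).2
  ∧ pvStripA cs false false false true =
      (pvSkipBlock cs).1 ++ pvStripB (pvSkipBlock cs).2

theorem pvInv_all (n : Nat) : ∀ cs : List Char, cs.length < n → pvInv cs := by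
  induction n with
  | zero => intro cs h; omega
  | succ n ih =>
    intro cs hlen
    cases cs with
    | nil =>
      refine ⟨?_, ?_, ?_, ?_, ?_⟩ <;> simp [pvStripA, pvStripB, pvStringTail, pvSkipBlock]
    | cons ch rest =>
      simp only [List.length_cons] at hlen
      have hrest : rest.length < n := by omega
      obtain ⟨I0, I1, I2, I3, I4⟩ := ih rest hrest
      have htail : rest.tail.length < n := by
        have h2 : rest.tail.length = rest.length - 1 := List.length_tail; omega
      refine ⟨?_, ?_, ?_, ?_, ?_⟩
      · -- neutral mode
        rw [pvStripA.eq_def, pvStripB.eq_def]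
        by_cases h1 : ch = '\''
        · subst h1; simp [I1]
        by_cases h2 : ch = '"'
        · subst h2; simp [I2]
        by_cases h3 : ch = '`'
        · subst h3; simp [I3]
        by_cases h4 : ch = '/' ∧ rest.head? = some '/'
        · obtain ⟨hc, hh⟩ := h4; subst hc
          have hlt : (pvSkipLineB rest.tail).length < n :=
            Nat.lt_of_le_of_lt (pvSkipLineB_length rest.tail) htail
          simp [hh, pvSkipLineAB, (ih _ hlt).1]
        by_cases h5 : ch = '/' ∧ rest.head? = some '*'
        · obtain ⟨hc, hh⟩ := h5; subst hc
          simp [hh, (ih rest.tail htail).2.2.2.2]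
        · simp [h1, h2, h3, h4, h5, I0]
      · -- single-quote mode
        rw [pvStripA.eq_def]
        by_cases hb : ch = '\\'
        · subst hb
          cases rest with
          | nil => simp [pvStringTail_cons, pvStripA, pvStripB]
          | cons d rest' =>
            have hlt : rest'.length < n := by simp at hrest; omega
            simp [pvStringTail_cons, (ih rest' hlt).2.1]
        by_cases hq : ch = '\''
        · subst hq; simp [pvStringTail_cons, I0]
        · simp [pvStringTail_cons, hb, hq, I1]
      · -- double-quote mode
        rw [pvStripA.eq_def]
        by_cases hb : ch = '\\'
        · subst hb
          cases rest with
          | nil => simp [pvStringTail_cons, pvStripA, pvStripB]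
          | cons d rest' =>
            have hlt : rest'.length < n := by simp at hrest; omega
            simp [pvStringTail_cons, (ih rest' hlt).2.2.1]
        by_cases hq : ch = '"'
        · subst hq; simp [pvStringTail_cons, I0]
        · simp [pvStringTail_cons, hb, hq, I2]
      · -- backtick mode
        rw [pvStripA.eq_def]
        by_cases hb : ch = '\\'
        · subst hb
          cases rest with
          | nil => simp [pvStringTail_cons, pvStripA, pvStripB]
          | cons d rest' =>
            have hlt : rest'.length < n := by simp at hrest; omega
            simp [pvStringTail_cons, (ih rest' hlt).2.2.2.1]
        by_cases hq : ch = '`'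
        · subst hq; simp [pvStringTail_cons, I0]
        · simp [pvStringTail_cons, hb, hq, I3]
      · -- block-comment mode
        rw [pvStripA.eq_def]
        by_cases hend : ch = '*' ∧ rest.head? = some '/'
        · obtain ⟨hc, hh⟩ := hend; subst hc
          simp [pvSkipBlock, hh, (ih rest.tail htail).1]
        · simp [pvSkipBlock, hend, I4]

-- ===== VERDICT (by name: the statement is the Claim_ definition above) =====
theorem strip_js_css_comments_spec : Claim_equal_strip_js_css_comments := by
  intro text _
  show _ = _
  unfold strip_js_css_comments strip_js_css_comments_alt
  exact congrArg String.mk (pvInv_all (text.toList.length + 1) text.toList (by omega)).1
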